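-- pv_equiv track=rewrite | github.com/wazuh/wazuh | framework/wazuh/core/wdb.py | __query_lower
-- ===== SOURCE A (Python) =====
-- def __query_lower(query: str) -> str:
--     """Convert a query to lower except the words between "".
--
--     Parameters
--     ----------
--     query : str
--         Query to be converted.
--
--     Returns
--     -------
--     str
--         New query.
--     """
--     to_lower = True
--     new_query = ''
--
--     for i in query:
--         if to_lower and i != "'":
--             new_query += i.lower()
--         elif to_lower and i == "'":
--             new_query += i
--             to_lower = False
--         elif not to_lower and i != "'":
--             new_query += i
--         elif not to_lower and i == "'":
--             new_query += i
--             to_lower = True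
--
--     return new_query
-- ===== SOURCE B (Python) =====
-- def __query_lower(query: str) -> str:
--     segments = query.split("'")
--     return "'".join(s.lower() if i % 2 == 0 else s
--                     for i, s in enumerate(segments))
-- ===== Notes on version B (the rewrite author's own statement) =====
-- stated objective: idiomatic
-- what changed: Replaces the per-character toggling state machine with split on the quote character, lowercasing even-indexed (outside-quote) segments, and joining back with quotes.
import Mathlib
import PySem

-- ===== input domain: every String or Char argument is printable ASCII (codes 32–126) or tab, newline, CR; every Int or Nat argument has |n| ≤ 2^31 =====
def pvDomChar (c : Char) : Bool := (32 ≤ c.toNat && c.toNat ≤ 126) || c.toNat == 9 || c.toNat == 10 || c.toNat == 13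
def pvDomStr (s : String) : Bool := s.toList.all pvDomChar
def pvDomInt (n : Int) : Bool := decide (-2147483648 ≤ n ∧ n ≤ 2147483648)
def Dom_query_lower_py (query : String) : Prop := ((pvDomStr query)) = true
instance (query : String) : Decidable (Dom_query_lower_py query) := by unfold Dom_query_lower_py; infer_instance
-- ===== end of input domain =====

-- B replaces A's per-character toggling state machine with split on "'", lowercasing even segments, and joining (idiomatic decomposition).


-- ===== PORT A =====
-- literal transliteration: for-loop over the characters with (to_lower, new_query) state, same branch order
def query_lower_py (query : String) : String :=
  let r := query.toList.foldl
    (fun (st : Bool × List Char) i =>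
      let toLower := st.1
      let newQuery := st.2
      if toLower && !(i == '\'') then (toLower, newQuery ++ [PySem.Chars.lowerChar i])
      else if toLower && (i == '\'') then (false, newQuery ++ [i])
      else if !toLower && !(i == '\'') then (toLower, newQuery ++ [i])
      else (true, newQuery ++ [i]))
    (true, ([] : List Char))
  String.ofList r.2

-- ===== PORT B =====
-- literal transliteration of Source B: split on "'", lowercase the even-indexed segments, join back
def query_lower_py_alt (query : String) : String :=
  let segments := PySem.Chars.splitOn query.toList ['\'']
  String.ofList (PySem.Chars.join ['\'']
    ((PySem.List.enumerate segments 0).map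
      (fun p => if PySem.Int.mod p.1 2 == 0 then PySem.Chars.lower p.2 else p.2)))

-- ===== PRECONDITION & SPEC =====
def Spec_query_lower_py (query : String) (out : String) : Prop := out = query_lower_py_alt query
instance (query : String) (out : String) : Decidable (Spec_query_lower_py query out) := by unfold Spec_query_lower_py; infer_instance

-- ===== CLAIM (what is proved, stated in full; the proofs are below) =====
def Claim_equal_query_lower_py : Prop := ∀ (query : String), Dom_query_lower_py query → Spec_query_lower_py query (query_lower_py query)

-- ===== LEMMAS AND PROOFS =====

-- A's loop as a structural recursion on the character list
def gA : List Char → Bool → List Char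
  | [], _ => []
  | c :: t, b =>
    if c == '\'' then c :: gA t (!b)
    else (if b then PySem.Chars.lowerChar c else c) :: gA t b

-- A's loop body, named so the invariant can be stated about it (definitionally A's lambda)
def stepA (st : Bool × List Char) (i : Char) : Bool × List Char :=
  let toLower := st.1
  let newQuery := st.2
  if toLower && !(i == '\'') then (toLower, newQuery ++ [PySem.Chars.lowerChar i])
  else if toLower && (i == '\'') then (false, newQuery ++ [i])
  else if !toLower && !(i == '\'') then (toLower, newQuery ++ [i])
  else (true, newQuery ++ [i])

theorem foldl_eq_gA (cs : List Char) (b : Bool) (acc : List Char) :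
    (cs.foldl stepA (b, acc)).2 = acc ++ gA cs b := by
  induction cs generalizing b acc with
  | nil => simp [gA]
  | cons c t ih =>
    rw [List.foldl_cons]
    by_cases hc : c = '\''
    · subst hc
      cases b
      · rw [show stepA (false, acc) '\'' = (true, acc ++ ['\'']) from by simp [stepA], ih]
        simp [gA]
      · rw [show stepA (true, acc) '\'' = (false, acc ++ ['\'']) from by simp [stepA], ih]
        simp [gA]
    · cases b
      · rw [show stepA (false, acc) c = (false, acc ++ [c]) from by simp [stepA, hc], ih]
        simp [gA, hc]
      · rw [show stepA (true, acc) c = (true, acc ++ [PySem.Chars.lowerChar c]) from by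
            simp [stepA, hc], ih]
        simp [gA, hc]

-- split on the quote character, structurally
def splitQ : List Char → List (List Char)
  | [] => [[]]
  | c :: t =>
    if c = '\'' then [] :: splitQ t
    else (c :: (splitQ t).headI) :: (splitQ t).tail

theorem splitQ_ne_nil (cs : List Char) : splitQ cs ≠ [] := by
  cases cs with
  | nil => simp [splitQ]
  | cons c t => by_cases h : c = '\'' <;> simp [splitQ, h]

theorem go_eq_splitQ (fuel : Nat) (l cur : List Char) (acc : List (List Char))
    (h : l.length < fuel) :
    PySem.Chars.splitOn.go ['\''] fuel l cur acc =
      acc.reverse ++ (cur.reverse ++ (splitQ l).headI) :: (splitQ l).tail := by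
  induction fuel generalizing l cur acc with
  | zero => omega
  | succ fuel ih =>
    cases l with
    | nil => simp [PySem.Chars.splitOn.go, splitQ]
    | cons c rest =>
      by_cases hc : c = '\''
      · subst hc
        rw [show PySem.Chars.splitOn.go ['\''] (fuel + 1) ('\'' :: rest) cur acc
              = PySem.Chars.splitOn.go ['\''] fuel rest [] (cur.reverse :: acc) by
            simp [PySem.Chars.splitOn.go, List.isPrefixOf]]
        rw [ih rest [] (cur.reverse :: acc) (by simpa using Nat.lt_of_succ_lt_succ h)]
        obtain ⟨hd, tl, hsp⟩ := List.exists_cons_of_ne_nil (splitQ_ne_nil rest)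
        simp [splitQ, hsp]
      · rw [show PySem.Chars.splitOn.go ['\''] (fuel + 1) (c :: rest) cur acc
              = PySem.Chars.splitOn.go ['\''] fuel rest (c :: cur) acc by
            simp only [PySem.Chars.splitOn.go, List.isPrefixOf]
            simp [Ne.symm hc]]
        rw [ih rest (c :: cur) acc (by simpa using Nat.lt_of_succ_lt_succ h)]
        simp [splitQ, hc]

theorem splitOn_eq_splitQ (cs : List Char) :
    PySem.Chars.splitOn cs ['\''] = splitQ cs := by
  rw [PySem.Chars.splitOn, go_eq_splitQ (cs.length + 1) cs [] [] (by omega)]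
  obtain ⟨hd, tl, hsp⟩ := List.exists_cons_of_ne_nil (splitQ_ne_nil cs)
  simp [hsp]

-- alternately lowering segments, starting with b
def altmap : Bool → List (List Char) → List (List Char)
  | _, [] => []
  | b, x :: t => (if b then PySem.Chars.lower x else x) :: altmap (!b) t

theorem parity_flip (k : Int) :
    (PySem.Int.mod (k + 1) 2 == 0) = !(PySem.Int.mod k 2 == 0) := by
  simp only [PySem.Int.mod_eq_emod_of_pos (show (0:Int) < 2 by norm_num)]
  rcases Int.emod_two_eq k with h | h
  · have h1 : (k + 1) % 2 = 1 := by omega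
    simp [h, h1]
  · have h1 : (k + 1) % 2 = 0 := by omega
    simp [h, h1]

theorem enumerate_map_eq_altmap (segs : List (List Char)) (k : Int) :
    ((PySem.List.enumerate segs k).map
      (fun p => if PySem.Int.mod p.1 2 == 0 then PySem.Chars.lower p.2 else p.2)) =
      altmap (PySem.Int.mod k 2 == 0) segs := by
  induction segs generalizing k with
  | nil => simp [PySem.List.enumerate, altmap]
  | cons s t ih =>
    rw [PySem.List.enumerate_cons]
    simp only [List.map_cons, ih (k + 1), parity_flip, altmap]

theorem join_cons_char (s : List Char) (c : Char) (x : List Char) (L : List (List Char)) :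
    PySem.Chars.join s ((c :: x) :: L) = c :: PySem.Chars.join s (x :: L) := by
  cases L <;> simp [PySem.Chars.join, List.intercalate]

theorem gA_eq_join (cs : List Char) (b : Bool) :
    gA cs b = PySem.Chars.join ['\''] (altmap b (splitQ cs)) := by
  induction cs generalizing b with
  | nil => cases b <;> simp [gA, splitQ, altmap, PySem.Chars.join, List.intercalate, PySem.Chars.lower]
  | cons c t ih =>
    obtain ⟨hd, tl, hsp⟩ := List.exists_cons_of_ne_nil (splitQ_ne_nil t)
    by_cases hc : c = '\''
    · subst hc
      have h1 : splitQ ('\'' :: t) = [] :: splitQ t := by simp [splitQ]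
      rw [h1]
      have h2 : altmap b ([] :: splitQ t) = [] :: altmap (!b) (splitQ t) := by
        cases b <;> simp [altmap, PySem.Chars.lower]
      rw [h2, hsp]
      have h3 : altmap (!b) (hd :: tl) =
          (if !b then PySem.Chars.lower hd else hd) :: altmap (!(!b)) tl := rfl
      rw [h3, PySem.Chars.join_cons_cons]
      have := ih (!b)
      rw [hsp] at this
      simp [gA, this, h3, PySem.Chars.join]
    · have h1 : splitQ (c :: t) = (c :: (splitQ t).headI) :: (splitQ t).tail := by
        simp [splitQ, hc]
      rw [h1, hsp]
      simp only [List.headI, List.tail]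
      have h2 : altmap b ((c :: hd) :: tl) =
          ((if b then PySem.Chars.lowerChar c else c) ::
            (if b then PySem.Chars.lower hd else hd)) :: altmap (!b) tl := by
        cases b <;> simp [altmap, PySem.Chars.lower]
      rw [h2, join_cons_char]
      have h3 : altmap b (hd :: tl) =
          (if b then PySem.Chars.lower hd else hd) :: altmap (!b) tl := by
        cases b <;> simp [altmap]
      have := ih b
      rw [hsp, h3] at this
      simp [gA, hc, this]

-- ===== VERDICT (by name: the statement is the Claim_ definition above) =====
theorem query_lower_py_spec : Claim_equal_query_lower_py := by
  intro query _
  show String.ofList (query.toList.foldl stepA (true, [])).2 =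
    String.ofList (PySem.Chars.join ['\'']
      ((PySem.List.enumerate (PySem.Chars.splitOn query.toList ['\'']) 0).map
        (fun p => if PySem.Int.mod p.1 2 == 0 then PySem.Chars.lower p.2 else p.2)))
  rw [foldl_eq_gA, splitOn_eq_splitQ, enumerate_map_eq_altmap]
  have h0 : (PySem.Int.mod 0 2 == 0) = true := by decide
  rw [h0, List.nil_append, gA_eq_join]
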